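-- pv_equiv track=rewrite | github.com/all-mx/Forked-from-GeneralFramework | reactorlize.py | find_region
-- ===== SOURCE A (Python) =====
-- def find_region(lines: list[str], begin_marker: str, end_marker: str) -> tuple[int, int]:
--     begin_idx = next((i for i, line in enumerate(lines) if begin_marker in line), -1)
--     if begin_idx == -1:
--         raise RuntimeError(f"Missing marker: {begin_marker}")
--
--     end_idx = next(
--         (i for i in range(begin_idx + 1, len(lines)) if end_marker in lines[i]),
--         -1,
--     )
--     if end_idx == -1:
--         raise RuntimeError(f"Missing marker: {end_marker}")
--
--     return begin_idx, end_idx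
-- ===== SOURCE B (Python) =====
-- def find_region(lines: list[str], begin_marker: str, end_marker: str) -> tuple[int, int]:
--     # Precompute the (ascending) indices of all lines containing end_marker,
--     # then binary-search that index list for the first end line after begin.
--     ends = [i for i, line in enumerate(lines) if end_marker in line]
--     begin_idx = -1
--     for i, line in enumerate(lines):
--         if begin_marker in line:
--             begin_idx = i
--             break
--     if begin_idx == -1:
--         raise RuntimeError(f"Missing marker: {begin_marker}")
--     lo, hi = 0, len(ends)
--     while lo < hi:
--         mid = (lo + hi) // 2
--         if ends[mid] <= begin_idx:
--             lo = mid + 1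
--         else:
--             hi = mid
--     if lo == len(ends):
--         raise RuntimeError(f"Missing marker: {end_marker}")
--     return begin_idx, ends[lo]
-- ===== Notes on version B (the rewrite author's own statement) =====
-- stated objective: alternative
-- what changed: Instead of A's second sequential scan from begin_idx+1, B precomputes the ascending list of indices of all end-marker lines once and then binary-searches that index list for the first end index strictly greater than begin_idx.
import Mathlib
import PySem

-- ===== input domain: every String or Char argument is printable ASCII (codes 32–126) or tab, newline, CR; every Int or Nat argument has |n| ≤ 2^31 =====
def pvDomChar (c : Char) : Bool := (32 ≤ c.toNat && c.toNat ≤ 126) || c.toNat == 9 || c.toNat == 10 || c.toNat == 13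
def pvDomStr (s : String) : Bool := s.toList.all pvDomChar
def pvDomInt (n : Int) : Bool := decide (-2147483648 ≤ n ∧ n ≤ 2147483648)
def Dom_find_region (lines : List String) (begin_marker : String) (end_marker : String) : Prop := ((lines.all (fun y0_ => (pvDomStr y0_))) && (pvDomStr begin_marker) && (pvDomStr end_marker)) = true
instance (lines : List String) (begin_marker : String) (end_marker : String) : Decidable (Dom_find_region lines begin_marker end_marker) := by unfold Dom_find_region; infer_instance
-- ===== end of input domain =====

-- B replaces A's second sequential scan by precomputing the ascending index list of all
-- end-marker lines and binary-searching it for the first end index after the begin line.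


-- ===== PORT A =====
-- begin_idx = next((i for i, line in enumerate(lines) if begin_marker in line), -1);
-- end_idx = next((i for i in range(begin_idx + 1, len(lines)) if end_marker in lines[i]), -1).
-- The two 'raise RuntimeError' paths (excluded by Pre_) are rendered as (-1, -1).
def find_region (lines : List String) (begin_marker : String) (end_marker : String) : Int × Int :=
  let begin_idx : Int :=
    (((PySem.List.enumerate lines).find? (fun p => PySem.Str.isIn begin_marker p.2)).map Prod.fst).getD (-1)
  if begin_idx = -1 then (-1, -1)
  else
    let end_idx : Int :=
      ((PySem.List.pyRange (begin_idx + 1) (lines.length : Int) 1).find?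
          (fun i => PySem.Str.isIn end_marker (PySem.List.pyGetD lines i ""))).getD (-1)
    if end_idx = -1 then (-1, -1)
    else (begin_idx, end_idx)

-- ===== PORT B =====
-- ends = [i for i, line in enumerate(lines) if end_marker in line]
def fr_ends (end_marker : String) (lines : List String) : List Int :=
  ((PySem.List.enumerate lines).filter (fun p => PySem.Str.isIn end_marker p.2)).map Prod.fst

-- the for-loop with break that sets begin_idx (initialised to -1)
def fr_begin (begin_marker : String) : List String → Int → Int
  | [], _ => -1
  | l :: ls, i => if PySem.Str.isIn begin_marker l then i else fr_begin begin_marker ls (i + 1)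

-- while lo < hi: mid = (lo+hi)//2; if ends[mid] <= b: lo = mid+1 else: hi = mid
-- (ends[mid] is in range whenever lo < hi ≤ len ends, so getD's default is never used)
-- fuel makes the loop structurally recursive; hi - lo shrinks each step, so
-- fuel = len(ends) (the initial hi - lo) always suffices
def fr_bsearch (ends : List Int) (b : Int) : Nat → Nat → Nat → Nat
  | 0, lo, _hi => lo
  | fuel + 1, lo, hi =>
    if lo < hi then
      if ends.getD ((lo + hi) / 2) 0 ≤ b then fr_bsearch ends b fuel ((lo + hi) / 2 + 1) hi
      else fr_bsearch ends b fuel lo ((lo + hi) / 2)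
    else lo

-- the 'raise RuntimeError' paths (excluded by Pre_) are rendered as (-1, -1)
def find_region_alt (lines : List String) (begin_marker : String) (end_marker : String) : Int × Int :=
  let ends := fr_ends end_marker lines
  let b := fr_begin begin_marker lines 0
  if b = -1 then (-1, -1)
  else
    let lo := fr_bsearch ends b ends.length 0 ends.length
    if lo = ends.length then (-1, -1)
    else (b, ends.getD lo 0)

-- ===== PRECONDITION & SPEC =====
-- Pre_ excludes exactly the inputs where the Python raises RuntimeError: no line containing
-- begin_marker, or no line strictly after the first begin match containing end_marker
-- (equivalently: no pair i < j with begin_marker in lines[i] and end_marker in lines[j]).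
def Pre_find_region (lines : List String) (begin_marker : String) (end_marker : String) : Prop :=
  ∃ j < lines.length, PySem.Str.isIn end_marker (lines.getD j "") = true ∧
    ∃ i < j, PySem.Str.isIn begin_marker (lines.getD i "") = true

instance (lines : List String) (begin_marker : String) (end_marker : String) : Decidable (Pre_find_region lines begin_marker end_marker) := by unfold Pre_find_region; infer_instance

def pvWitness_find_region : List String × String × String := (["AA", "x", "BB"], "A", "B")

def Spec_find_region (lines : List String) (begin_marker : String) (end_marker : String) (out : Int × Int) : Prop := out = find_region_alt lines begin_marker end_marker
instance (lines : List String) (begin_marker : String) (end_marker : String) (out : Int × Int) : Decidable (Spec_find_region lines begin_marker end_marker out) := by unfold Spec_find_region; infer_instance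

-- ===== CLAIM (what is proved, stated in full; the proofs are below) =====
def Claim_equal_find_region : Prop := ∀ (lines : List String) (begin_marker : String) (end_marker : String), Dom_find_region lines begin_marker end_marker → Pre_find_region lines begin_marker end_marker → Spec_find_region lines begin_marker end_marker (find_region lines begin_marker end_marker)

-- ===== LEMMAS AND PROOFS =====

-- the common reference shape both ports are reduced to
def fr_ref_end (lines : List String) (end_marker : String) (k : Nat) : Int × Int :=
  match (lines.drop (k + 1)).findIdx? (fun l => PySem.Str.isIn end_marker l) with
  | none => (-1, -1)
  | some j => ((k : Int), (k : Int) + 1 + (j : Int))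

def fr_ref (lines : List String) (begin_marker : String) (end_marker : String) : Int × Int :=
  match lines.findIdx? (fun l => PySem.Str.isIn begin_marker l) with
  | none => (-1, -1)
  | some k => fr_ref_end lines end_marker k

theorem enumerate_find?_fst (q : String → Bool) :
    ∀ (ls : List String) (s : Int),
      ((PySem.List.enumerate ls s).find? (fun p => q p.2)).map Prod.fst
        = (ls.findIdx? q).map (fun (k : Nat) => s + (k : Int)) := by
  intro ls
  induction ls with
  | nil => intro s; simp [PySem.List.enumerate]
  | cons l ls ih =>
    intro s
    rw [show PySem.List.enumerate (l :: ls) s = (s, l) :: PySem.List.enumerate ls (s + 1) from rfl]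
    rw [List.find?_cons, List.findIdx?_cons]
    cases hq : q l with
    | true => simp
    | false =>
      rw [if_neg (by simp [hq])]
      rw [ih (s + 1)]
      cases h : ls.findIdx? q <;> simp <;> push_cast <;> ring

theorem range_find?_eq (q : String → Bool) (ls : List String) :
    ∀ (fuel m : Nat), ls.length = m + fuel →
      (PySem.List.pyRange (m : Int) (ls.length : Int) 1).find?
          (fun i => q (PySem.List.pyGetD ls i ""))
        = ((ls.drop m).findIdx? q).map (fun (j : Nat) => (m : Int) + (j : Int)) := by
  intro fuel
  induction fuel with
  | zero =>
    intro m hm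
    rw [PySem.List.pyRange_one_eq_nil (by omega)]
    rw [List.drop_eq_nil_of_le (by omega)]
    simp
  | succ f ih =>
    intro m hm
    have hmlt : m < ls.length := by omega
    rw [PySem.List.pyRange_one_cons (by exact_mod_cast hmlt)]
    rw [List.drop_eq_getElem_cons hmlt]
    rw [List.find?_cons, List.findIdx?_cons]
    have hget : PySem.List.pyGetD ls (m : Int) "" = ls[m] := by
      rw [PySem.List.pyGetD_eq_getElem ls "" (by positivity) (by exact_mod_cast hmlt)]
      simp
    rw [hget]
    cases hq : q ls[m] with
    | true => simp
    | false =>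
      rw [if_neg (by simp [hq])]
      have hc : ((m : Int) + 1) = ((m + 1 : Nat) : Int) := by push_cast; ring
      rw [hc, ih (m + 1) (by omega)]
      cases h : (ls.drop (m + 1)).findIdx? q <;> simp <;> push_cast <;> ring

theorem findIdx?_lt_length {α : Type} {p : α → Bool} {ls : List α} {k : Nat}
    (h : ls.findIdx? p = some k) : k < ls.length := by
  obtain ⟨h1, -⟩ := List.findIdx?_eq_some_iff_getElem.mp h
  exact h1

theorem find_region_eq_ref (lines : List String) (begin_marker : String) (end_marker : String) :
    find_region lines begin_marker end_marker = fr_ref lines begin_marker end_marker := by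
  unfold find_region fr_ref
  have h1 := enumerate_find?_fst (fun l => PySem.Str.isIn begin_marker l) lines 0
  cases hb : lines.findIdx? (fun l => PySem.Str.isIn begin_marker l) with
  | none =>
    rw [hb] at h1
    simp only [Option.map_none] at h1
    rw [h1]
    rfl
  | some k =>
    rw [hb] at h1
    simp only [Option.map_some, zero_add] at h1
    rw [h1]
    simp only [Option.getD_some]
    have hk : k < lines.length := findIdx?_lt_length hb
    rw [if_neg (by omega)]
    show _ = fr_ref_end lines end_marker k
    unfold fr_ref_end
    have hc : ((k : Int) + 1) = ((k + 1 : Nat) : Int) := by push_cast; ring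
    rw [hc, range_find?_eq (fun l => PySem.Str.isIn end_marker l) lines
          (lines.length - (k + 1)) (k + 1) (by omega)]
    cases he : (lines.drop (k + 1)).findIdx? (fun l => PySem.Str.isIn end_marker l) with
    | none => rfl
    | some j =>
      simp only [Option.map_some, Option.getD_some]
      rw [if_neg (by push_cast; omega)]

-- ---- B side ----

-- structural form of fr_ends with an explicit Nat start index
def endsAux (q : String → Bool) : List String → Nat → List Int
  | [], _ => []
  | l :: ls, s => if q l then ((s : Nat) : Int) :: endsAux q ls (s + 1) else endsAux q ls (s + 1)

theorem fr_ends_eq_endsAux (end_marker : String) :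
    ∀ (ls : List String) (s : Nat),
      ((PySem.List.enumerate ls (s : Int)).filter (fun p => PySem.Str.isIn end_marker p.2)).map Prod.fst
        = endsAux (fun l => PySem.Str.isIn end_marker l) ls s := by
  intro ls
  induction ls with
  | nil => intro s; rfl
  | cons l ls ih =>
    intro s
    rw [show PySem.List.enumerate (l :: ls) (s : Int) = ((s : Int), l) :: PySem.List.enumerate ls ((s : Int) + 1) from rfl]
    have hc : ((s : Int) + 1) = ((s + 1 : Nat) : Int) := by push_cast; ring
    unfold endsAux
    cases hq : PySem.Str.isIn end_marker l with
    | true =>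
      rw [if_pos rfl, List.filter_cons, if_pos (by simpa using hq), List.map_cons, hc, ih]
    | false =>
      rw [if_neg (by simp), List.filter_cons, if_neg (by simpa using hq), hc, ih]

theorem endsAux_mem_ge (q : String → Bool) :
    ∀ (ls : List String) (s : Nat) (x : Int), x ∈ endsAux q ls s → (s : Int) ≤ x := by
  intro ls
  induction ls with
  | nil => intro s x hx; simp [endsAux] at hx
  | cons l ls ih =>
    intro s x hx
    unfold endsAux at hx
    split at hx
    · rcases List.mem_cons.mp hx with h | h
      · omega
      · have := ih (s + 1) x h; push_cast at this ⊢; omega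
    · have := ih (s + 1) x hx; push_cast at this ⊢; omega

theorem endsAux_pairwise (q : String → Bool) :
    ∀ (ls : List String) (s : Nat), (endsAux q ls s).Pairwise (· < ·) := by
  intro ls
  induction ls with
  | nil => intro s; exact List.Pairwise.nil
  | cons l ls ih =>
    intro s
    unfold endsAux
    split
    · exact List.pairwise_cons.mpr ⟨fun x hx => by
        have := endsAux_mem_ge q ls (s + 1) x hx; push_cast at this ⊢; omega, ih (s + 1)⟩
    · exact ih (s + 1)

-- sorted access on getD for proofs about the binary search
theorem endsAux_getD_mono (q : String → Bool) (ls : List String) (s : Nat) :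
    ∀ (i j : Nat), i ≤ j → j < (endsAux q ls s).length →
      (endsAux q ls s).getD i 0 ≤ (endsAux q ls s).getD j 0 := by
  intro i j hij hj
  have hp := endsAux_pairwise q ls s
  rcases Nat.lt_or_ge i j with h | h
  · have := (List.pairwise_iff_getElem.mp hp) i j (by omega) hj h
    rw [List.getD_eq_getElem _ _ (by omega), List.getD_eq_getElem _ _ hj]
    omega
  · have : i = j := by omega
    subst this; rfl

-- characterisation of the binary search result
theorem fr_bsearch_char (ends : List Int) (b : Int)
    (hmono : ∀ (i j : Nat), i ≤ j → j < ends.length → ends.getD i 0 ≤ ends.getD j 0) :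
    ∀ (fuel lo hi : Nat), hi - lo ≤ fuel → lo ≤ hi → hi ≤ ends.length →
      (∀ i, i < lo → ends.getD i 0 ≤ b) →
      (∀ i, hi ≤ i → i < ends.length → b < ends.getD i 0) →
      fr_bsearch ends b fuel lo hi ≤ ends.length ∧
        (∀ i, i < fr_bsearch ends b fuel lo hi → ends.getD i 0 ≤ b) ∧
        (fr_bsearch ends b fuel lo hi < ends.length → b < ends.getD (fr_bsearch ends b fuel lo hi) 0) := by
  intro fuel
  induction fuel with
  | zero =>
    intro lo hi hf hle hlen hlow hhigh
    have : lo = hi := by omega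
    subst this
    rw [show fr_bsearch ends b 0 lo lo = lo from rfl]
    exact ⟨by omega, hlow, fun h => hhigh lo (le_refl _) h⟩
  | succ f ih =>
    intro lo hi hf hle hlen hlow hhigh
    by_cases h : lo < hi
    · rw [show fr_bsearch ends b (f + 1) lo hi =
          (if ends.getD ((lo + hi) / 2) 0 ≤ b then fr_bsearch ends b f ((lo + hi) / 2 + 1) hi
           else fr_bsearch ends b f lo ((lo + hi) / 2)) from by rw [fr_bsearch]; simp [h]]
      by_cases hm : ends.getD ((lo + hi) / 2) 0 ≤ b
      · rw [if_pos hm]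
        exact ih ((lo + hi) / 2 + 1) hi (by omega) (by omega) hlen
          (fun i hi' => by
            rcases Nat.lt_or_ge i lo with h' | h'
            · exact hlow i h'
            · exact le_trans (hmono i ((lo + hi) / 2) (by omega) (by omega)) hm)
          hhigh
      · rw [if_neg hm]
        exact ih lo ((lo + hi) / 2) (by omega) (by omega) (by omega) hlow
          (fun i hi1 hi2 => lt_of_lt_of_le (by omega) (hmono ((lo + hi) / 2) i hi1 hi2))
    · have : lo = hi := by omega
      subst this
      rw [show fr_bsearch ends b (f + 1) lo lo = lo from by rw [fr_bsearch]; simp]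
      exact ⟨by omega, hlow, fun h => hhigh lo (le_refl _) h⟩

theorem find?_eq_bind_findIdx? {α : Type} (p : α → Bool) :
    ∀ (ls : List α), ls.find? p = (ls.findIdx? p).bind (fun i => ls[i]?) := by
  intro ls
  induction ls with
  | nil => rfl
  | cons x xs ih =>
    rw [List.find?_cons, List.findIdx?_cons]
    cases hp : p x with
    | true => simp
    | false =>
      rw [if_neg (by simp [hp]), ih]
      cases h : xs.findIdx? p <;> simp

-- first element of endsAux beyond the start, when the threshold is below the start
theorem endsAux_find_lt (q : String → Bool) (b : Int) :
    ∀ (ls : List String) (s : Nat), b < (s : Int) →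
      (endsAux q ls s).find? (fun e => decide (b < e))
        = (ls.findIdx? q).map (fun (k : Nat) => ((s + k : Nat) : Int)) := by
  intro ls
  induction ls with
  | nil => intro s _; rfl
  | cons l ls ih =>
    intro s hs
    unfold endsAux
    rw [List.findIdx?_cons]
    cases hq : q l with
    | true =>
      rw [if_pos rfl, List.find?_cons]
      simp only [decide_eq_true hs]
      simp
    | false =>
      rw [if_neg (by simp), if_neg (by simp)]
      rw [ih (s + 1) (by push_cast at hs ⊢; omega)]
      cases h : ls.findIdx? q <;> simp <;> push_cast <;> ring

-- first element of endsAux strictly greater than bn is bn+1 plus findIdx? of the drop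
theorem endsAux_find_gt (q : String → Bool) :
    ∀ (ls : List String) (s bn : Nat), s ≤ bn + 1 →
      (endsAux q ls s).find? (fun e => decide ((bn : Int) < e))
        = ((ls.drop (bn + 1 - s)).findIdx? q).map (fun (j : Nat) => ((bn + 1 + j : Nat) : Int)) := by
  intro ls
  induction ls with
  | nil => intro s bn _; simp [endsAux]
  | cons l ls ih =>
    intro s bn hs
    rcases Nat.lt_or_ge s (bn + 1) with hlt | hge
    · -- s ≤ bn: head (if any) fails the predicate, recurse
      have hdrop : (l :: ls).drop (bn + 1 - s) = ls.drop (bn + 1 - (s + 1)) := by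
        rw [show bn + 1 - s = (bn + 1 - (s + 1)) + 1 from by omega]
        rfl
      have hdec : decide ((bn : Int) < ((s : Nat) : Int)) = false :=
        decide_eq_false (by push_cast; omega)
      unfold endsAux
      cases hq : q l with
      | true =>
        rw [if_pos rfl, List.find?_cons]
        simp only [hdec]
        rw [ih (s + 1) bn (by omega), hdrop]
      | false =>
        rw [if_neg (by simp), ih (s + 1) bn (by omega), hdrop]
    · -- s = bn + 1: everything qualifies
      have hseq : s = bn + 1 := by omega
      subst hseq
      rw [show bn + 1 - (bn + 1) = 0 from by omega, List.drop_zero]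
      have hdec : decide ((bn : Int) < ((bn + 1 : Nat) : Int)) = true :=
        decide_eq_true (by push_cast; omega)
      unfold endsAux
      rw [List.findIdx?_cons]
      cases hq : q l with
      | true =>
        rw [if_pos rfl, List.find?_cons]
        simp only [hdec]
        simp
      | false =>
        rw [if_neg (by simp), if_neg (by simp)]
        rw [endsAux_find_lt q (bn : Int) ls (bn + 2) (by push_cast; omega)]
        cases h : ls.findIdx? q <;> simp <;> push_cast <;> ring

theorem fr_begin_eq (begin_marker : String) :
    ∀ (ls : List String) (s : Nat),
      fr_begin begin_marker ls (s : Int)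
        = match ls.findIdx? (fun l => PySem.Str.isIn begin_marker l) with
          | none => -1
          | some k => ((s + k : Nat) : Int) := by
  intro ls
  induction ls with
  | nil => intro s; rfl
  | cons l ls ih =>
    intro s
    unfold fr_begin
    rw [List.findIdx?_cons]
    cases hq : PySem.Str.isIn begin_marker l with
    | true => simp
    | false =>
      rw [if_neg (by simp), if_neg (by simp)]
      have hc : ((s : Int) + 1) = ((s + 1 : Nat) : Int) := by push_cast; ring
      rw [hc, ih (s + 1)]
      cases h : ls.findIdx? (fun l => PySem.Str.isIn begin_marker l) <;> simp <;> push_cast <;> ring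

theorem find_region_alt_eq_ref (lines : List String) (begin_marker : String) (end_marker : String) :
    find_region_alt lines begin_marker end_marker = fr_ref lines begin_marker end_marker := by
  unfold find_region_alt fr_ref
  have hb := fr_begin_eq begin_marker lines 0
  rw [Nat.cast_zero] at hb
  have hends : fr_ends end_marker lines = endsAux (fun l => PySem.Str.isIn end_marker l) lines 0 := by
    have h := fr_ends_eq_endsAux end_marker lines 0
    rw [Nat.cast_zero] at h
    exact h
  cases hfb : lines.findIdx? (fun l => PySem.Str.isIn begin_marker l) with
  | none =>
    rw [hfb] at hb
    rw [hb]
    simp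
  | some k =>
    rw [hfb] at hb
    simp only [Nat.zero_add] at hb
    rw [hb, hends]
    rw [if_neg (by simp)]
    show _ = fr_ref_end lines end_marker k
    unfold fr_ref_end
    set E := endsAux (fun l => PySem.Str.isIn end_marker l) lines 0 with hEdef
    set lo := fr_bsearch E (k : Int) E.length 0 E.length with hlo
    have hmono : ∀ (i j : Nat), i ≤ j → j < E.length → E.getD i 0 ≤ E.getD j 0 := by
      rw [hEdef]; exact endsAux_getD_mono _ lines 0
    have hchar := fr_bsearch_char E (k : Int) hmono E.length 0 E.length
      (by omega) (by omega) (le_refl _)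
      (fun i hi => absurd hi (Nat.not_lt_zero i))
      (fun i h1 h2 => absurd h2 (by omega))
    rw [← hlo] at hchar
    obtain ⟨hle, hlow, hhigh⟩ := hchar
    have hfind : E.find? (fun e => decide ((k : Int) < e))
        = ((lines.drop (k + 1)).findIdx? (fun l => PySem.Str.isIn end_marker l)).map
            (fun (j : Nat) => ((k + 1 + j : Nat) : Int)) := by
      rw [hEdef]
      have h := endsAux_find_gt (fun l => PySem.Str.isIn end_marker l) lines 0 k (Nat.zero_le _)
      simpa using h
    have hfind2 : E.find? (fun e => decide ((k : Int) < e))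
        = if h : lo < E.length then some (E.getD lo 0) else none := by
      rw [find?_eq_bind_findIdx?]
      by_cases h : lo < E.length
      · rw [dif_pos h]
        have hidx : E.findIdx? (fun e => decide ((k : Int) < e)) = some lo := by
          apply List.findIdx?_eq_some_iff_getElem.mpr
          refine ⟨h, ?_, ?_⟩
          · have h2 := hhigh h
            rw [List.getD_eq_getElem _ _ h] at h2
            simpa using h2
          · intro j hj
            have h3 := hlow j hj
            rw [List.getD_eq_getElem _ _ (by omega : j < E.length)] at h3
            simpa using h3
        rw [hidx]
        simp [List.getElem?_eq_getElem h, List.getD_eq_getElem _ _ h]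
      · rw [dif_neg h]
        have hidx : E.findIdx? (fun e => decide ((k : Int) < e)) = none := by
          apply List.findIdx?_eq_none_iff.mpr
          intro x hx
          rcases List.getElem_of_mem hx with ⟨i, hi, hix⟩
          have h3 := hlow i (by omega)
          rw [List.getD_eq_getElem _ _ hi, hix] at h3
          simpa using h3
        rw [hidx]; rfl
    cases hd : (lines.drop (k + 1)).findIdx? (fun l => PySem.Str.isIn end_marker l) with
    | none =>
      rw [hd] at hfind
      simp only [Option.map_none] at hfind
      rw [hfind] at hfind2
      by_cases h : lo < E.length
      · rw [dif_pos h] at hfind2; exact absurd hfind2 (by simp)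
      · rw [if_pos (by omega)]
    | some j =>
      rw [hd] at hfind
      simp only [Option.map_some] at hfind
      rw [hfind] at hfind2
      by_cases h : lo < E.length
      · rw [dif_pos h] at hfind2
        rw [if_neg (by omega)]
        have hv : E.getD lo 0 = ((k + 1 + j : Nat) : Int) := by
          injection hfind2.symm
        have hc2 : ((k + 1 + j : Nat) : Int) = (k : Int) + 1 + (j : Int) := by push_cast; ring
        rw [hv, hc2]
      · rw [dif_neg h] at hfind2; exact absurd hfind2 (by simp)

-- ===== VERDICT (by name: the statement is the Claim_ definition above) =====
theorem find_region_spec : Claim_equal_find_region := by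
  intro lines begin_marker end_marker _dom _pre
  unfold Spec_find_region
  rw [find_region_eq_ref, find_region_alt_eq_ref]
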